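-- pv_equiv track=rewrite | github.com/Suchitra1912/coding-challenges | coding_challenge_23/solution.py | series_23
-- ===== SOURCE A (Python) =====
-- def series_23(n: int) -> list[int]:
--     """
--     Generate the series: 1, 5, 9, 13, 21...
--     """
--     if n <= 0:
--         raise ValueError("N must be positive")
--
--     series = [1]
--     diffs = [4, 4, 4, 8]  # Based on series pattern
--
--     while len(series) < n:
--         if len(series) - 1 < len(diffs):
--             next_val = series[-1] + diffs[len(series) - 1]
--         else:
--             # Continue pattern by doubling the last difference
--             next_val = series[-1] + (series[-1] - series[-2]) * 2
--         series.append(next_val)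
--
--     return series[:n]
-- ===== SOURCE B (Python) =====
-- def series_23(n: int) -> list[int]:
--     """
--     Generate the series: 1, 5, 9, 13, 21...
--     Closed form per index: term 0 is 1, term 1 is 5, term k is 5 + 2**k for k >= 2.
--     """
--     if n <= 0:
--         raise ValueError("N must be positive")
--     return [1, 5][:n] + [5 + (1 << k) for k in range(2, n)]
-- ===== Notes on version B (the rewrite author's own statement) =====
-- stated objective: simpler
-- what changed: Replaced the incremental difference-table/doubling loop over a growing list with a direct closed-form evaluation per index (two fixed head terms, then a power-of-two offset per term).
import Mathlib
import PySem

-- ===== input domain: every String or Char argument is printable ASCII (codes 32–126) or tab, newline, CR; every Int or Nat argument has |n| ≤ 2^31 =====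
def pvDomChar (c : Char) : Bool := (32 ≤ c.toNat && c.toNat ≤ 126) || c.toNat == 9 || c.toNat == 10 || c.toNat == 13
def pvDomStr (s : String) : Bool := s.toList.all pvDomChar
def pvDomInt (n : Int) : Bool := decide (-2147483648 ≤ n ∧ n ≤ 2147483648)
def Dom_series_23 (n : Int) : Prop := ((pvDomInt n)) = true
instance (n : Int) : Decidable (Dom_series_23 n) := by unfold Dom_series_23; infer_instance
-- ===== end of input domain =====

-- B replaces A's incremental difference-table/doubling loop with a per-index closed form (simpler).


-- ===== PORT A =====
def diffsA : List Int := [4, 4, 4, 8]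

-- the 'next_val' computation of A's loop body (both branches)
def nextA (series : List Int) : Int :=
  if (series.length : Int) - 1 < (diffsA.length : Int) then
    (PySem.List.pyGet? series (-1)).getD 0 +
      (PySem.List.pyGet? diffsA ((series.length : Int) - 1)).getD 0
  else
    (PySem.List.pyGet? series (-1)).getD 0 +
      ((PySem.List.pyGet? series (-1)).getD 0 - (PySem.List.pyGet? series (-2)).getD 0) * 2

-- the while loop: append until len(series) reaches n
def loopA (n : Nat) (series : List Int) : List Int :=
  if _h : series.length < n then
    loopA n (series ++ [nextA series])
  else series
termination_by n - series.length
decreasing_by simp; omega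

def series_23 (n : Int) : List Int :=
  PySem.List.slice (loopA n.toNat [1]) none (some n)

-- ===== PORT B =====
-- Python's left shift of one is (1 : Int) <<< t (exact here: every shift amount in the range is nonnegative)
def shl1 (t : Nat) : Int := (1 : Int) <<< t

-- the head-terms slice plus the comprehension over the remaining indices
def series_23_alt (n : Int) : List Int :=
  PySem.List.slice ([1, 5] : List Int) none (some n) ++
    (PySem.List.pyRange 2 n 1).map (fun k => 5 + shl1 k.toNat)

-- ===== PRECONDITION & SPEC =====
-- A raises ValueError exactly on non-positive n; those inputs are excluded.
def Pre_series_23 (n : Int) : Prop := 1 ≤ n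
instance (n : Int) : Decidable (Pre_series_23 n) := by unfold Pre_series_23; infer_instance
def pvWitness_series_23 : Int := (3)

def Spec_series_23 (n : Int) (out : List Int) : Prop := out = series_23_alt n
instance (n : Int) (out : List Int) : Decidable (Spec_series_23 n out) := by unfold Spec_series_23; infer_instance

-- ===== CLAIM (what is proved, stated in full; the proofs are below) =====
def Claim_equal_series_23 : Prop := ∀ (n : Int), Dom_series_23 n → Pre_series_23 n → Spec_series_23 n (series_23 n)

-- ===== LEMMAS AND PROOFS =====

-- the closed form with a Nat index
def fT (k : Nat) : Int := if k = 0 then 1 else if k = 1 then 5 else 5 + 2 ^ k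

lemma alt_eq_map (n : Int) (hn : 1 ≤ n) : series_23_alt n = (List.range n.toNat).map fT := by
  unfold series_23_alt
  rw [PySem.List.slice_to _ (by omega), PySem.List.pyRange_one]
  rcases eq_or_lt_of_le hn with h1 | h2
  · rw [show n = 1 by omega]
    decide
  · obtain ⟨k, hk⟩ : ∃ k : Nat, n.toNat = 2 + k := ⟨n.toNat - 2, by omega⟩
    rw [hk, List.range_add, List.map_append,
      show (n - 2).toNat = k by omega,
      show ([1, 5] : List Int).take (2 + k) = [1, 5] by simp]
    refine congrArg₂ (· ++ ·) (by decide) ?_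
    rw [List.map_map, List.map_map]
    apply List.map_congr_left
    intro j _
    have ht : ((2:Int) + (j:Int)).toNat = 2 + j := by omega
    simp only [Function.comp, ht, fT, shl1]
    rw [Int.shiftLeft_eq, if_neg (by omega), if_neg (by omega)]
    ring

lemma last_map_fT (m : Nat) (h : 1 ≤ m) :
    (PySem.List.pyGet? ((List.range m).map fT) (-1)).getD 0 = fT (m-1) := by
  rw [PySem.List.pyGet?_neg_one, List.getLast?_eq_getElem?]
  simp [Nat.sub_lt (by omega : 0 < m)]

lemma last2_map_fT (m : Nat) (h : 2 ≤ m) :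
    (PySem.List.pyGet? ((List.range m).map fT) (-2)).getD 0 = fT (m-2) := by
  simp [PySem.List.pyGet?, PySem.List.pyIdx?, h, show m-2 < m by omega]

lemma next_eq (m : Nat) (h : 1 ≤ m) : nextA ((List.range m).map fT) = fT m := by
  unfold nextA
  have hlen : (((List.range m).map fT).length : Int) = (m : Int) := by simp
  rw [hlen]
  by_cases h4 : m ≤ 4
  · interval_cases m <;> rw [if_pos (by norm_num [diffsA])] <;> decide
  · rw [if_neg (by simp [diffsA]; omega)]
    rw [last_map_fT m (by omega), last2_map_fT m (by omega)]
    obtain ⟨j, rfl⟩ : ∃ j, m = j + 5 := ⟨m - 5, by omega⟩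
    show fT (j+4) + (fT (j+4) - fT (j+3)) * 2 = fT (j+5)
    simp [fT]
    ring

lemma loopA_inv (n m : Nat) (h1 : 1 ≤ m) :
    loopA n ((List.range m).map fT) = (List.range (max n m)).map fT := by
  by_cases h : m < n
  · rw [loopA, dif_pos (by simpa using h), next_eq m h1,
      show (List.range m).map fT ++ [fT m] = (List.range (m+1)).map fT by simp [List.range_succ],
      loopA_inv n (m+1) (by omega), show max n (m+1) = max n m by omega]
  · rw [loopA, dif_neg (by simpa using h), show max n m = m by omega]
termination_by n - m
decreasing_by omega

-- ===== VERDICT (by name: the statement is the Claim_ definition above) =====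
theorem series_23_spec : Claim_equal_series_23 := by
  intro n _ hpre
  unfold Pre_series_23 at hpre
  unfold Spec_series_23 series_23
  have h1 : ([1] : List Int) = (List.range 1).map fT := by decide
  rw [h1, loopA_inv n.toNat 1 (by omega),
    show max n.toNat 1 = n.toNat by omega,
    PySem.List.slice_to _ (by omega), List.take_of_length_le (by simp), alt_eq_map n hpre]
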